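-- pv_equiv track=rewrite | github.com/db-Lee/iclr2026-5078 | multigenprm/data/preprocess_data.py | normalize_process_labels
-- ===== SOURCE A (Python) =====
-- def get_first_error_step_index(labels):
--     """Helper function to find first error position"""
--     for i, label in enumerate(labels):
--         if label == -1:
--             return i
--     return len(labels)
--
-- def normalize_process_labels(labels):
--     """
--     Normalize labels to valid process format: [1,1,1,...,-1,-1,-1,...]
--     Once we find the first -1, all subsequent labels become -1.
--     """
--     if not labels:
--         return []
--
--     normalized = labels.copy()
--     first_error_pos = get_first_error_step_index(labels)
--
--     # Make all labels before first error position become 1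
--     for i in range(0, first_error_pos):
--         normalized[i] = 1
--
--     # Make all labels after first error position become -1
--     for i in range(first_error_pos, len(normalized)):
--         normalized[i] = -1
--
--     return normalized
-- ===== SOURCE B (Python) =====
-- def normalize_process_labels(labels):
--     out = []
--     seen_error = False
--     for label in labels:
--         if label == -1:
--             seen_error = True
--         out.append(-1 if seen_error else 1)
--     return out
-- ===== Notes on version B (the rewrite author's own statement) =====
-- stated objective: simpler
-- what changed: Replaces the find-first-error scan plus two index-based fill loops over a copied list with a single forward pass carrying a seen_error flag and appending 1 or -1.
import Mathlib
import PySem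

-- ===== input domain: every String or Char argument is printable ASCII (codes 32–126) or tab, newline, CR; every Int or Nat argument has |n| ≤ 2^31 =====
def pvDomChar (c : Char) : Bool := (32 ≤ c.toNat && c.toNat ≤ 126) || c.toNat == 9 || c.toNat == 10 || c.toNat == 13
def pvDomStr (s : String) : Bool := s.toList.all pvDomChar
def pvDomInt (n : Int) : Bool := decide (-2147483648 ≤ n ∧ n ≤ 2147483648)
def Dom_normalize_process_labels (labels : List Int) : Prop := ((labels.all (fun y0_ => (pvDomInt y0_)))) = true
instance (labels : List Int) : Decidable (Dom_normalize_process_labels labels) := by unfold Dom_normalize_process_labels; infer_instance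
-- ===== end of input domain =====

-- B replaces A's find-first-error scan plus two index fill loops with one forward pass
-- carrying a seen_error flag (objective: simpler). Return-value equivalence only: A also
-- returns a fresh copy, neither mutates its argument.

-- ===== PORT A =====
-- helper: first index holding -1, else len(labels) (enumerate loop, early return)
def get_first_error_step_index (labels : List Int) : Int :=
  go 0 labels
where
  go (i : Int) : List Int → Int
    | [] => i
    | l :: ls => if l = -1 then i else go (i + 1) ls

def normalize_process_labels (labels : List Int) : List Int :=
  if labels = [] then []
  else
    let normalized := labels
    let first_error_pos := get_first_error_step_index labels
    -- for i in range(0, first_error_pos): normalized[i] = 1  (indices in range, pySetD exact)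
    let normalized := (PySem.List.pyRange 0 first_error_pos 1).foldl
      (fun acc i => PySem.List.pySetD acc i 1) normalized
    -- for i in range(first_error_pos, len(normalized)): normalized[i] = -1
    let normalized := (PySem.List.pyRange first_error_pos (normalized.length : Int) 1).foldl
      (fun acc i => PySem.List.pySetD acc i (-1)) normalized
    normalized

-- ===== PORT B =====
def normalize_process_labels_alt (labels : List Int) : List Int :=
  (labels.foldl
    (fun (st : Bool × List Int) label =>
      let seen := st.1 || (label == -1)
      (seen, st.2 ++ [if seen then -1 else 1]))
    (false, [])).2

-- ===== PRECONDITION & SPEC =====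
def Spec_normalize_process_labels (labels : List Int) (out : List Int) : Prop := out = normalize_process_labels_alt labels
instance (labels : List Int) (out : List Int) : Decidable (Spec_normalize_process_labels labels out) := by unfold Spec_normalize_process_labels; infer_instance

-- ===== CLAIM (what is proved, stated in full; the proofs are below) =====
def Claim_equal_normalize_process_labels : Prop := ∀ (labels : List Int), Dom_normalize_process_labels labels → Spec_normalize_process_labels labels (normalize_process_labels labels)

-- ===== LEMMAS AND PROOFS =====

-- first-error index as a Nat on a suffix
def firstErr : List Int → Nat
  | [] => 0
  | l :: ls => if l = -1 then 0 else firstErr ls + 1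

lemma firstErr_le_length (xs : List Int) : firstErr xs ≤ xs.length := by
  induction xs with
  | nil => simp [firstErr]
  | cons l ls ih => simp only [firstErr, List.length_cons]; split_ifs <;> omega

lemma get_first_error_go (xs : List Int) : ∀ i : Int,
    get_first_error_step_index.go i xs = i + (firstErr xs : Int) := by
  induction xs with
  | nil => intro i; simp [get_first_error_step_index.go, firstErr]
  | cons l ls ih =>
    intro i
    simp only [get_first_error_step_index.go, firstErr]
    split_ifs with h
    · simp
    · rw [ih]; push_cast; ring

lemma get_first_error_eq (xs : List Int) :
    get_first_error_step_index xs = (firstErr xs : Int) := by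
  simpa using get_first_error_go xs 0

-- filling xs[a..b) with v (a ≤ b ≤ len) yields take a ++ replicate (b-a) v ++ drop b
lemma fill_range (v : Int) : ∀ (k a : Nat) (xs : List Int), a + k ≤ xs.length →
    (PySem.List.pyRange (a : Int) ((a + k : Nat) : Int) 1).foldl
      (fun acc i => PySem.List.pySetD acc i v) xs
    = xs.take a ++ List.replicate k v ++ xs.drop (a + k) := by
  intro k
  induction k with
  | zero =>
    intro a xs _
    rw [PySem.List.pyRange_one_eq_nil (by omega)]
    simp
  | succ n ih =>
    intro a xs h
    rw [PySem.List.pyRange_one_cons (by push_cast; omega), List.foldl_cons]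
    have hset : PySem.List.pySetD xs (a : Int) v = xs.set a v := by
      simp [PySem.List.pySetD_natCast]
    rw [hset]
    have hcast : ((a : Int) + 1) = (((a + 1 : Nat)) : Int) := by push_cast; ring
    have hend : ((a + (n + 1) : Nat) : Int) = (((a + 1) + n : Nat) : Int) := by push_cast; ring
    rw [hcast, hend, ih (a + 1) (xs.set a v) (by simpa using (by omega : (a+1) + n ≤ xs.length))]
    have ha : a < xs.length := by omega
    have htake : (xs.set a v).take (a + 1) = xs.take a ++ [v] := by
      rw [List.set_eq_take_cons_drop v ha]
      simp [List.take_append, Nat.min_eq_left (Nat.le_of_lt ha)]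
    have hdrop : (xs.set a v).drop ((a + 1) + n) = xs.drop (a + (n + 1)) := by
      rw [List.drop_set, if_pos (by omega)]
      congr 1; omega
    rw [htake, hdrop]
    simp [List.replicate_succ, List.append_assoc]

lemma normalize_eq_replicate (xs : List Int) (hne : xs ≠ []) :
    normalize_process_labels xs
      = List.replicate (firstErr xs) 1 ++ List.replicate (xs.length - firstErr xs) (-1) := by
  have hle := firstErr_le_length xs
  simp only [normalize_process_labels, if_neg hne, get_first_error_eq]
  have h1 : (PySem.List.pyRange 0 ((firstErr xs : Nat) : Int) 1).foldl
      (fun acc i => PySem.List.pySetD acc i 1) xs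
      = List.replicate (firstErr xs) 1 ++ xs.drop (firstErr xs) := by
    have := fill_range 1 (firstErr xs) 0 xs (by omega)
    simpa using this
  rw [h1]
  have hlen : (List.replicate (firstErr xs) 1 ++ xs.drop (firstErr xs)).length = xs.length := by
    simp; omega
  rw [hlen]
  have h2 := fill_range (-1) (xs.length - firstErr xs) (firstErr xs)
      (List.replicate (firstErr xs) (1:Int) ++ xs.drop (firstErr xs))
      (by rw [hlen]; omega)
  have hcast : ((firstErr xs + (xs.length - firstErr xs) : Nat) : Int) = (xs.length : Int) := by
    push_cast; omega
  rw [hcast] at h2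
  rw [h2]
  have htake : (List.replicate (firstErr xs) (1:Int) ++ xs.drop (firstErr xs)).take (firstErr xs)
      = List.replicate (firstErr xs) 1 := by
    simp
  have hdrop : (List.replicate (firstErr xs) (1:Int) ++ xs.drop (firstErr xs)).drop
      (firstErr xs + (xs.length - firstErr xs)) = [] := by
    apply List.drop_eq_nil_of_le
    rw [hlen]; omega
  rw [htake, hdrop, List.append_nil]

-- B's fold, peeled into a recursion on the list
def goB (seen : Bool) : List Int → List Int
  | [] => []
  | l :: ls =>
    let s := seen || (l == -1)
    (if s then -1 else 1) :: goB s ls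

lemma alt_foldl (xs : List Int) : ∀ (seen : Bool) (acc : List Int),
    (xs.foldl
      (fun (st : Bool × List Int) label =>
        let seen := st.1 || (label == -1)
        (seen, st.2 ++ [if seen then -1 else 1]))
      (seen, acc)).2 = acc ++ goB seen xs := by
  induction xs with
  | nil => intro seen acc; simp [goB]
  | cons l ls ih =>
    intro seen acc
    simp only [List.foldl_cons, goB]
    rw [ih]
    simp

lemma goB_true (xs : List Int) : goB true xs = List.replicate xs.length (-1) := by
  induction xs with
  | nil => simp [goB]
  | cons l ls ih => simp [goB, ih, List.replicate_succ]

lemma goB_false (xs : List Int) :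
    goB false xs = List.replicate (firstErr xs) 1 ++ List.replicate (xs.length - firstErr xs) (-1) := by
  induction xs with
  | nil => simp [goB, firstErr]
  | cons l ls ih =>
    by_cases h : l = -1
    · simp [goB, h, firstErr, goB_true, List.replicate_succ]
    · have hle := firstErr_le_length ls
      have hbeq : (l == -1) = false := by simp [h]
      simp only [goB, firstErr, hbeq, Bool.false_or, if_neg h, Bool.false_eq_true, if_false,
        List.length_cons]
      rw [ih]
      have harith : ls.length + 1 - (firstErr ls + 1) = ls.length - firstErr ls := by omega
      simp [List.replicate_succ, harith]

lemma alt_eq_replicate (xs : List Int) :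
    normalize_process_labels_alt xs
      = List.replicate (firstErr xs) 1 ++ List.replicate (xs.length - firstErr xs) (-1) := by
  unfold normalize_process_labels_alt
  rw [alt_foldl xs false [], List.nil_append, goB_false]

-- ===== VERDICT (by name: the statement is the Claim_ definition above) =====
theorem normalize_process_labels_spec : Claim_equal_normalize_process_labels := by
  intro labels _
  unfold Spec_normalize_process_labels
  by_cases h : labels = []
  · subst h; rfl
  · rw [normalize_eq_replicate labels h, alt_eq_replicate]
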